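-- pv_equiv track=rewrite | github.com/ondrejsvorc/UJEP | 1. year/APR2/lectures/lecture_5/main.py | nones_at_end
-- ===== SOURCE A (Python) =====
-- from typing import Iterable
--
-- def nones_at_end(lst: Iterable):
--     """
--     Kontroluje, zda jsou všechny hodnoty None soustředěny v souvislém bloku
--     na úplném konci iterovatelného objektu.
--
--     :param lst: iterovatelný objekt k testování.
--     :return: True, pokud jsou všechny None na konci, jinak False.
--     """
--     # Stavová proměnná označující, zda jsme už narazili na None
--     found_none = False
--     for item in lst:
--         if item is None:
--             found_none = True
--         elif found_none:
--             # Narazili jsme na hodnotu, která není None po prvním None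
--             return False
--     return True
-- ===== SOURCE B (Python) =====
-- def nones_at_end(lst):
--     xs = list(lst)
--     n = sum(1 for x in xs if x is None)
--     return xs[len(xs) - n:] == [None] * n
-- ===== Notes on version B (the rewrite author's own statement) =====
-- stated objective: alternative
-- what changed: Instead of a sequential scan with a state flag, B counts the None values (n) and checks the list's length-n tail slice equals a freshly built list of n Nones.
import Mathlib
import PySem

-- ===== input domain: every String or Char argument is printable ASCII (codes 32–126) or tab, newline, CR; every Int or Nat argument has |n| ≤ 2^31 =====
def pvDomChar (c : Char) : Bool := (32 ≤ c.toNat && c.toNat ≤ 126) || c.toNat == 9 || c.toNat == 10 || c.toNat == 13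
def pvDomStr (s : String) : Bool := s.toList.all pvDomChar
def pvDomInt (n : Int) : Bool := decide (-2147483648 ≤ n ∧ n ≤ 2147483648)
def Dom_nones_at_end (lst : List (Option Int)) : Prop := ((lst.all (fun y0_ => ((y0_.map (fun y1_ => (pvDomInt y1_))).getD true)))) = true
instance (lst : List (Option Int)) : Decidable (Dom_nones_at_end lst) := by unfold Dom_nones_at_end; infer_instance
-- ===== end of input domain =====

-- B replaces A's stateful flag scan by counting the Nones (n) and comparing the last n elements with [None]*n (alternative algorithm; same cost).

-- ===== PORT A =====
-- A's loop over lst carrying the found_none flag; early 'return False' = returning false.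
def nonesAtEndLoop (lst : List (Option Int)) (found_none : Bool) : Bool :=
  match lst with
  | [] => true
  | item :: rest =>
    if item = none then nonesAtEndLoop rest true
    else if found_none then false
    else nonesAtEndLoop rest found_none

def nones_at_end (lst : List (Option Int)) : Bool :=
  nonesAtEndLoop lst false

-- ===== PORT B =====
-- n = sum(1 for x in xs if x is None); return xs[len(xs)-n:] == [None]*n
def nones_at_end_alt (lst : List (Option Int)) : Bool :=
  let xs := lst
  let n : Int := xs.foldl (fun acc x => if x.isNone then acc + 1 else acc) 0
  PySem.List.slice xs (some ((xs.length : Int) - n)) none == PySem.List.pyRepeat [none] n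

-- ===== PRECONDITION & SPEC =====
def Spec_nones_at_end (lst : List (Option Int)) (out : Bool) : Prop := out = nones_at_end_alt lst
instance (lst : List (Option Int)) (out : Bool) : Decidable (Spec_nones_at_end lst out) := by unfold Spec_nones_at_end; infer_instance

-- ===== CLAIM (what is proved, stated in full; the proofs are below) =====
def Claim_equal_nones_at_end : Prop := ∀ (lst : List (Option Int)), Dom_nones_at_end lst → Spec_nones_at_end lst (nones_at_end lst)

-- ===== LEMMAS AND PROOFS =====

-- Once the flag is set, A's loop checks that every remaining element is none.
theorem nonesAtEndLoop_true (lst : List (Option Int)) :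
    nonesAtEndLoop lst true = lst.all (fun x => x.isNone) := by
  induction lst with
  | nil => rfl
  | cons h t ih =>
    cases h <;> simp [nonesAtEndLoop, ih]

-- A computes the dropWhile/all characterization.
theorem nones_at_end_eq_dropWhile (lst : List (Option Int)) :
    nones_at_end lst = (lst.dropWhile (fun x => x.isSome)).all (fun x => x.isNone) := by
  unfold nones_at_end
  induction lst with
  | nil => rfl
  | cons h t ih =>
    cases h with
    | none =>
      simp [nonesAtEndLoop, List.dropWhile, nonesAtEndLoop_true]
    | some v =>
      simpa [nonesAtEndLoop, List.dropWhile] using ih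

-- B computes decide (drop (len - count) lst = replicate count none).
theorem nones_at_end_alt_eq (lst : List (Option Int)) :
    nones_at_end_alt lst =
      decide (lst.drop (lst.length - lst.countP (fun x => x.isNone)) =
        List.replicate (lst.countP (fun x => x.isNone)) none) := by
  unfold nones_at_end_alt
  have hcount : lst.foldl (fun acc x => if x.isNone then acc + 1 else acc) (0 : Int)
      = (lst.countP (fun x => x.isNone) : Int) := by
    simpa using PySem.List.foldl_if_add_one (fun x : Option Int => x.isNone) lst 0
  have hle : lst.countP (fun x => x.isNone) ≤ lst.length := List.countP_le_length
  have hfrom : ((lst.length : Int) - (lst.countP (fun x => x.isNone) : Int))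
      = ((lst.length - lst.countP (fun x => x.isNone) : Nat) : Int) := by
    omega
  simp only [hcount, hfrom, PySem.List.slice_from_natCast]
  have hrep : PySem.List.pyRepeat [(none : Option Int)] ((lst.countP (fun x => x.isNone) : Nat) : Int)
      = List.replicate (lst.countP (fun x => x.isNone)) none := by
    simp [PySem.List.pyRepeat_singleton]
  rw [hrep]
  by_cases heq : lst.drop (lst.length - lst.countP (fun x => x.isNone))
      = List.replicate (lst.countP (fun x => x.isNone)) (none : Option Int)
  · simp [heq]
  · simp [heq]

-- The two characterizations agree.
theorem dropWhile_iff_count (lst : List (Option Int)) :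
    ((lst.dropWhile (fun x => x.isSome)).all (fun x => x.isNone) = true) ↔
      (lst.drop (lst.length - lst.countP (fun x => x.isNone)) =
        List.replicate (lst.countP (fun x => x.isNone)) none) := by
  constructor
  · intro h
    have hsplit : lst = lst.takeWhile (fun x : Option Int => x.isSome)
        ++ lst.dropWhile (fun x : Option Int => x.isSome) :=
      (List.takeWhile_append_dropWhile).symm
    have hrall : ∀ x ∈ lst.dropWhile (fun x : Option Int => x.isSome), x = none := by
      intro x hx
      have hx' := List.all_eq_true.mp h x hx
      cases x with
      | none => rfl
      | some v => simp at hx'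
    have hrrep : lst.dropWhile (fun x : Option Int => x.isSome)
        = List.replicate (lst.dropWhile (fun x : Option Int => x.isSome)).length none :=
      List.eq_replicate_of_mem hrall
    have htc : (lst.takeWhile (fun x : Option Int => x.isSome)).countP
        (fun x : Option Int => x.isNone) = 0 := by
      rw [List.countP_eq_zero]
      intro x hx
      have hx' := List.mem_takeWhile_imp hx
      cases x with
      | none => simp at hx'
      | some v => simp
    have hc : lst.countP (fun x => x.isNone)
        = (lst.dropWhile (fun x : Option Int => x.isSome)).length := by
      have h1 := congrArg (List.countP (fun x : Option Int => x.isNone)) hsplit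
      rw [List.countP_append, htc, Nat.zero_add] at h1
      conv_rhs at h1 => rw [hrrep]
      rw [List.countP_replicate] at h1
      simpa using h1
    have hlen : lst.length = (lst.takeWhile (fun x : Option Int => x.isSome)).length
        + (lst.dropWhile (fun x : Option Int => x.isSome)).length := by
      conv_lhs => rw [hsplit]
      exact List.length_append
    rw [hc]
    have harith : lst.length - (lst.dropWhile (fun x : Option Int => x.isSome)).length
        = (lst.takeWhile (fun x : Option Int => x.isSome)).length := by omega
    rw [harith]
    exact (congrArg (List.drop (lst.takeWhile (fun x : Option Int => x.isSome)).length) hsplit).trans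
      (List.drop_left.trans hrrep)
  · intro h
    have hle : lst.countP (fun x : Option Int => x.isNone) ≤ lst.length :=
      List.countP_le_length
    have hsplit : lst = lst.take (lst.length - lst.countP (fun x : Option Int => x.isNone))
        ++ List.replicate (lst.countP (fun x : Option Int => x.isNone)) none := by
      conv_lhs => rw [← List.take_append_drop
        (lst.length - lst.countP (fun x : Option Int => x.isNone)) lst]
      rw [h]
    have hfc : (lst.take (lst.length - lst.countP (fun x : Option Int => x.isNone))).countP
        (fun x : Option Int => x.isNone) = 0 := by
      have hcc := congrArg (List.countP (fun x : Option Int => x.isNone)) hsplit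
      rw [List.countP_append, List.countP_replicate] at hcc
      simp only [Option.isNone_none, reduceIte] at hcc
      omega
    have hfall : ∀ x ∈ lst.take (lst.length - lst.countP (fun x : Option Int => x.isNone)),
        (x : Option Int).isSome = true := by
      intro x hx
      have hx' := List.countP_eq_zero.mp hfc x hx
      cases x with
      | none => simp at hx'
      | some v => rfl
    conv_lhs => rw [hsplit]
    rw [List.all_eq_true]
    intro x hx
    rw [List.dropWhile_append] at hx
    have hemp : ((lst.take (lst.length - lst.countP (fun x : Option Int => x.isNone))).dropWhile
        (fun x => x.isSome)).isEmpty = true := by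
      rw [List.isEmpty_iff, List.dropWhile_eq_nil_iff]
      intro x hxf
      exact hfall x hxf
    rw [if_pos hemp] at hx
    have hx' : x ∈ List.replicate (lst.countP (fun x : Option Int => x.isNone)) (none : Option Int) :=
      (List.dropWhile_sublist _).mem hx
    simp [List.eq_of_mem_replicate hx']

-- ===== VERDICT (by name: the statement is the Claim_ definition above) =====
theorem nones_at_end_spec : Claim_equal_nones_at_end := by
  intro lst _
  unfold Spec_nones_at_end
  rw [nones_at_end_eq_dropWhile, nones_at_end_alt_eq]
  by_cases h : (lst.dropWhile (fun x => x.isSome)).all (fun x => x.isNone) = true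
  · rw [h, (dropWhile_iff_count lst).mp h]; simp
  · have h2 : ¬ (lst.drop (lst.length - lst.countP (fun x => x.isNone)) =
        List.replicate (lst.countP (fun x => x.isNone)) none) := fun hc =>
      h ((dropWhile_iff_count lst).mpr hc)
    simp only [h2, decide_false]
    simpa using h
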